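-- pv_equiv track=rewrite | github.com/umbs/practice | IK/Strings/Test/MoveLettersToLeft.py | move_letters_to_left_side_with_minimizing_memory_writes
-- ===== SOURCE A (Python) =====
-- def move_letters_to_left_side_with_minimizing_memory_writes(s):
--     arr = list(s)
--
--     wrt, ex = -1, -1
--
--     # find first writable position
--     for i in range(0, len(arr)):
--         if arr[i].isdigit():
--             wrt = i
--             break
--
--     # String has no digit
--     if wrt == -1:
--         return s
--
--     ex = wrt + 1
--
--     while ex < len(arr):
--         if arr[ex].isdigit():
--             ex += 1
--         else:
--             arr[wrt] = arr[ex]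
--             wrt, ex = wrt + 1, ex + 1
--
--     return ''.join(arr)
-- ===== SOURCE B (Python) =====
-- def move_letters_to_left_side_with_minimizing_memory_writes(s):
--     letters = [c for c in s if not c.isdigit()]
--     return ''.join(letters) + s[len(letters):]
-- ===== Notes on version B (the rewrite author's own statement) =====
-- stated objective: simpler
-- what changed: Replaces A's find-first-digit scan plus two-pointer in-place overwrite loop with a single filter of the non-digit characters concatenated with the original suffix s[len(letters):].
import Mathlib
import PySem

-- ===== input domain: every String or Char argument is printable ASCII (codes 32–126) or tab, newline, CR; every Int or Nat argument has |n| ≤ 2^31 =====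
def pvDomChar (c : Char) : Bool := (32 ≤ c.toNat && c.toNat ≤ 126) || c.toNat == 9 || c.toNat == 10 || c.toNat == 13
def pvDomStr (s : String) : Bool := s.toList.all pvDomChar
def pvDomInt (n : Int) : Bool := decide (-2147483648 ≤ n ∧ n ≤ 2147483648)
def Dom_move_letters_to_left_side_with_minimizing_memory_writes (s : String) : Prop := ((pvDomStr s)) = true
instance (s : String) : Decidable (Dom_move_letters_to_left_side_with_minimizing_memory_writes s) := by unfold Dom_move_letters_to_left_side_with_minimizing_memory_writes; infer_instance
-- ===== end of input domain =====

-- B replaces A's two-pointer in-place overwrite with filter-then-concatenate (letters, then the original tail s[len(letters):]); objective: simpler.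


-- ===== PORT A =====
-- the 'for i in range(0, len(arr)): if arr[i].isdigit(): wrt = i; break' search (result -1 if no digit)
def pvFindWrt (arr : List Char) (i : Nat) : Int :=
  if h : i < arr.length then
    if PySem.Chars.isdigit arr[i] then (i : Int) else pvFindWrt arr (i + 1)
  else -1
termination_by arr.length - i

-- the 'while ex < len(arr)' compaction loop over the mutable array
def pvLoopA (arr : List Char) (wrt ex : Nat) : List Char :=
  if h : ex < arr.length then
    if PySem.Chars.isdigit arr[ex] then pvLoopA arr wrt (ex + 1)
    else pvLoopA (arr.set wrt arr[ex]) (wrt + 1) (ex + 1)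
  else arr
termination_by arr.length - ex
decreasing_by all_goals first | omega | (simp only [List.length_set]; omega)

def move_letters_to_left_side_with_minimizing_memory_writes (s : String) : String :=
  let arr := s.toList
  let wrt : Int := pvFindWrt arr 0
  if wrt = -1 then s
  else String.ofList (pvLoopA arr wrt.toNat (wrt.toNat + 1))

-- ===== PORT B =====
def move_letters_to_left_side_with_minimizing_memory_writes_alt (s : String) : String :=
  let letters := s.toList.filter (fun c => !PySem.Chars.isdigit c)
  String.ofList letters ++ String.ofList (s.toList.drop letters.length)

-- ===== PRECONDITION & SPEC =====
def Spec_move_letters_to_left_side_with_minimizing_memory_writes (s : String) (out : String) : Prop := out = move_letters_to_left_side_with_minimizing_memory_writes_alt s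
instance (s : String) (out : String) : Decidable (Spec_move_letters_to_left_side_with_minimizing_memory_writes s out) := by unfold Spec_move_letters_to_left_side_with_minimizing_memory_writes; infer_instance

-- ===== CLAIM (what is proved, stated in full; the proofs are below) =====
def Claim_equal_move_letters_to_left_side_with_minimizing_memory_writes : Prop := ∀ (s : String), Dom_move_letters_to_left_side_with_minimizing_memory_writes s → Spec_move_letters_to_left_side_with_minimizing_memory_writes s (move_letters_to_left_side_with_minimizing_memory_writes s)

-- ===== LEMMAS AND PROOFS =====

-- The compaction loop writes the letters of the unread suffix after position wrt
-- and leaves the tail beyond the final write pointer untouched.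
theorem pvLoopA_eq (n : Nat) : ∀ (arr : List Char) (wrt ex : Nat),
    arr.length - ex = n → wrt ≤ ex →
    pvLoopA arr wrt ex =
      arr.take wrt ++ (arr.drop ex).filter (fun c => !PySem.Chars.isdigit c) ++
        arr.drop (wrt + ((arr.drop ex).filter (fun c => !PySem.Chars.isdigit c)).length) := by
  induction n with
  | zero =>
    intro arr wrt ex hn hle
    have hge : arr.length ≤ ex := by omega
    rw [pvLoopA]
    simp [List.drop_eq_nil_of_le hge, List.take_append_drop, dif_neg (by omega : ¬ ex < arr.length)]
  | succ m ih =>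
    intro arr wrt ex hn hle
    have hex : ex < arr.length := by omega
    have hdrop : arr[ex] :: arr.drop (ex + 1) = arr.drop ex := List.getElem_cons_drop hex
    rw [pvLoopA, dif_pos hex]
    by_cases hd : PySem.Chars.isdigit arr[ex]
    · have hfe : (arr.drop ex).filter (fun c => !PySem.Chars.isdigit c) =
          (arr.drop (ex + 1)).filter (fun c => !PySem.Chars.isdigit c) := by
        conv_lhs => rw [← hdrop]
        simp only [List.filter_cons, hd, Bool.not_true]
        simp
      rw [if_pos hd, ih arr wrt (ex + 1) (by omega) (by omega), hfe]
    · rw [if_neg hd]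
      have hd' : PySem.Chars.isdigit arr[ex] = false := by simpa using hd
      have hwl : wrt < arr.length := by omega
      have hdrop' : (arr.set wrt arr[ex]).drop (ex + 1) = arr.drop (ex + 1) :=
        List.drop_set_of_lt (by omega)
      have hfilter : (arr.drop ex).filter (fun c => !PySem.Chars.isdigit c) =
          arr[ex] :: (arr.drop (ex + 1)).filter (fun c => !PySem.Chars.isdigit c) := by
        conv_lhs => rw [← hdrop]
        simp only [List.filter_cons, hd', Bool.not_false]
        simp
      have htake : (arr.set wrt arr[ex]).take (wrt + 1) = arr.take wrt ++ [arr[ex]] := by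
        rw [List.take_set, List.take_succ_eq_append_getElem hwl,
            List.set_append_right _ _ (by simp)]
        simp [Nat.min_eq_left (Nat.le_of_lt hwl)]
      rw [ih (arr.set wrt arr[ex]) (wrt + 1) (ex + 1)
            (by simp only [List.length_set]; omega) (by omega)]
      rw [hdrop', htake, hfilter]
      have hdropTail : ∀ j : Nat, wrt < j → (arr.set wrt arr[ex]).drop j = arr.drop j :=
        fun j hj => List.drop_set_of_lt hj
      rw [hdropTail _ (by omega)]
      simp
      omega

-- pvFindWrt returns -1 or a valid index
theorem pvFindWrt_shape (n : Nat) : ∀ (arr : List Char) (i : Nat), arr.length - i = n →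
    (pvFindWrt arr i = -1 ∧ ((arr.drop i).all fun c => !PySem.Chars.isdigit c)) ∨
    (∃ k : Nat, pvFindWrt arr i = (k : Int) ∧ i ≤ k ∧ ∃ h : k < arr.length,
      PySem.Chars.isdigit arr[k] ∧ (((arr.take k).drop i).all fun c => !PySem.Chars.isdigit c)) := by
  induction n with
  | zero =>
    intro arr i hn
    left
    rw [pvFindWrt, dif_neg (by omega : ¬ i < arr.length)]
    simp [List.drop_eq_nil_of_le (by omega : arr.length ≤ i)]
  | succ m ih =>
    intro arr i hn
    have hi : i < arr.length := by omega
    rw [pvFindWrt, dif_pos hi]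
    by_cases hd : PySem.Chars.isdigit arr[i]
    · right
      exact ⟨i, by rw [if_pos hd], le_refl i, hi, hd, by
        simp [List.drop_eq_nil_of_le (by simp : ((arr.take i).length ≤ i))]⟩
    · rw [if_neg hd]
      have hdropi : arr[i] :: arr.drop (i + 1) = arr.drop i := List.getElem_cons_drop hi
      rcases ih arr (i + 1) (by omega) with ⟨h1, h2⟩ | ⟨k, hk, hik, hkl, hkd, hall⟩
      · left
        have hd' : PySem.Chars.isdigit arr[i] = false := by simpa using hd
        refine ⟨h1, ?_⟩
        rw [List.all_eq_true]
        intro x hx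
        rw [← hdropi] at hx
        rcases List.mem_cons.mp hx with h | h
        · simp [h, hd']
        · simpa using List.all_eq_true.mp h2 x h
      · right
        have hd' : PySem.Chars.isdigit arr[i] = false := by simpa using hd
        refine ⟨k, hk, by omega, hkl, hkd, ?_⟩
        have hlt : i < (arr.take k).length := by simp; omega
        have hstep : (arr.take k).drop i = arr[i] :: (arr.take k).drop (i + 1) := by
          rw [← List.getElem_cons_drop hlt]
          congr 1
          exact List.getElem_take
        rw [hstep]
        simp [List.all_cons, hd', hall]


-- ===== VERDICT (by name: the statement is the Claim_ definition above) =====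
theorem move_letters_to_left_side_with_minimizing_memory_writes_spec : Claim_equal_move_letters_to_left_side_with_minimizing_memory_writes := by
  intro s _
  unfold Spec_move_letters_to_left_side_with_minimizing_memory_writes
  unfold move_letters_to_left_side_with_minimizing_memory_writes
  unfold move_letters_to_left_side_with_minimizing_memory_writes_alt
  simp only [← String.ofList_append]
  set arr := s.toList with harr
  rcases pvFindWrt_shape (arr.length - 0) arr 0 rfl with ⟨h1, h2⟩ | ⟨k, hk, -, hkl, hkd, hall⟩
  · rw [if_pos (by exact_mod_cast h1)]
    have hfil : arr.filter (fun c => !PySem.Chars.isdigit c) = arr :=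
      List.filter_eq_self.mpr (by simpa using List.all_eq_true.mp h2)
    rw [hfil, harr]
    rw [List.drop_eq_nil_of_le (by rw [String.length_toList])]
    simp
  · have hne : (k : Int) ≠ -1 := by omega
    rw [hk, if_neg hne]
    have htn : (k : Int).toNat = k := Int.toNat_natCast k
    rw [htn, pvLoopA_eq (arr.length - (k + 1)) arr k (k + 1) rfl (by omega)]
    congr 1
    have hsplit : arr = arr.take k ++ arr[k] :: arr.drop (k + 1) := by
      rw [List.getElem_cons_drop hkl, List.take_append_drop]
    have hfiltake : (arr.take k).filter (fun c => !PySem.Chars.isdigit c) = arr.take k :=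
      List.filter_eq_self.mpr (by simpa using List.all_eq_true.mp hall)
    have hfil : arr.filter (fun c => !PySem.Chars.isdigit c) =
        arr.take k ++ (arr.drop (k + 1)).filter (fun c => !PySem.Chars.isdigit c) := by
      conv_lhs => rw [hsplit]
      rw [List.filter_append, hfiltake, List.filter_cons]
      simp [hkd]
    rw [hfil]
    have hlen : (arr.take k).length = k := by simp; omega
    simp [hlen]
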